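-- pv_equiv track=rewrite | github.com/Kquxxi/e2eClipUploader | pipeline/transcribe/script.py | _split_on_punct
-- ===== SOURCE A (Python) =====
-- def _split_on_punct(words_list):
--     subs, cur = [], []
--     for w in words_list:
--         cur.append(w)
--         if w['word'].strip().endswith(('.', ',', '?', '!')):
--             subs.append(cur); cur = []
--     if cur: subs.append(cur)
--     return subs
-- ===== SOURCE B (Python) =====
-- def _split_on_punct(words_list):
--     punct = ('.', ',', '?', '!')
--     cuts = [i for i, w in enumerate(words_list) if w['word'].strip().endswith(punct)]
--     subs = []
--     start = 0
--     for i in cuts: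
--         subs.append(words_list[start:i + 1])
--         start = i + 1
--     if start < len(words_list):
--         subs.append(words_list[start:])
--     return subs
-- ===== Notes on version B (the rewrite author's own statement) =====
-- stated objective: alternative
-- what changed: B first collects the indices of punctuation-ending words in one pass, then builds the groups by slicing words_list between consecutive cut indices, instead of A's running accumulator that is flushed on each punctuation word.
import Mathlib
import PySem

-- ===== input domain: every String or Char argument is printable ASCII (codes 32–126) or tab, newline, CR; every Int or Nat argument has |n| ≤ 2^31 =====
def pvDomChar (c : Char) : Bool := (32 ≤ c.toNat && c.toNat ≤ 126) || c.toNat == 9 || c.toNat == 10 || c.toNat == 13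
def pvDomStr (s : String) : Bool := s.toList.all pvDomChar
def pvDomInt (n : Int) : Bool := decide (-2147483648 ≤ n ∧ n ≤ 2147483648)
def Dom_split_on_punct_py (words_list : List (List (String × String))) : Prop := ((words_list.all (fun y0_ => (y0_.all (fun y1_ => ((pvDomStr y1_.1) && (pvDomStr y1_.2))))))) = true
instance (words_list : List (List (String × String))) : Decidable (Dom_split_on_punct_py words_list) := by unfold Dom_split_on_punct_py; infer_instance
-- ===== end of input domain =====

-- B collects the cut indices first and then slices the list between consecutive cuts,
-- instead of A's running accumulator flushed at each punctuation word (objective: alternative decomposition).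

abbrev pvW : Type := List (String × String)

-- shared helper: both Pythons contain literally w['word'].strip().endswith(('.', ',', '?', '!'))
-- (dict lookup = first match in the association list; getD "" is only reached outside Pre_)
def pvPunct (w : pvW) : Bool :=
  let s := PySem.Str.strip (((w.find? (fun p => p.1 == "word")).map Prod.snd).getD "")
  PySem.Str.endswith s "." || PySem.Str.endswith s "," || PySem.Str.endswith s "?" || PySem.Str.endswith s "!"

-- ===== PORT A =====
-- A's loop body: cur = st.2; append w, flush to subs on punctuation
def pvAStep (st : List (List pvW) × List pvW) (w : pvW) : List (List pvW) × List pvW :=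
  if pvPunct w then (st.1 ++ [st.2 ++ [w]], []) else (st.1, st.2 ++ [w])

def split_on_punct_py (words_list : List (List (String × String))) : List (List (List (String × String))) :=
  let st := words_list.foldl pvAStep ([], [])
  if st.2.isEmpty then st.1 else st.1 ++ [st.2]

-- ===== PORT B =====
-- B's loop body: subs.append(words_list[start:i+1]); start = i+1
def pvBStep (words_list : List pvW) (st : List (List pvW) × Int) (i : Int) : List (List pvW) × Int :=
  (st.1 ++ [PySem.List.slice words_list (some st.2) (some (i + 1))], i + 1)

def split_on_punct_py_alt (words_list : List (List (String × String))) : List (List (List (String × String))) :=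
  let cuts : List Int := ((PySem.List.enumerate words_list 0).filter (fun p => pvPunct p.2)).map Prod.fst
  let st := cuts.foldl (pvBStep words_list) ([], 0)
  if st.2 < (words_list.length : Int) then st.1 ++ [PySem.List.slice words_list (some st.2) none] else st.1

-- ===== PRECONDITION & SPEC =====
-- Pre_ excludes exactly the inputs where some word dict lacks the key 'word', on which Python A raises KeyError.
def Pre_split_on_punct_py (words_list : List (List (String × String))) : Prop :=
  (words_list.all (fun w => (w.find? (fun p => p.1 == "word")).isSome)) = true
instance (words_list : List (List (String × String))) : Decidable (Pre_split_on_punct_py words_list) := by unfold Pre_split_on_punct_py; infer_instance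
def pvWitness_split_on_punct_py : (List (List (String × String))) := [[("word", "hi.")], [("word", "yo")]]

def Spec_split_on_punct_py (words_list : List (List (String × String))) (out : List (List (List (String × String)))) : Prop := out = split_on_punct_py_alt words_list
instance (words_list : List (List (String × String))) (out : List (List (List (String × String)))) : Decidable (Spec_split_on_punct_py words_list out) := by unfold Spec_split_on_punct_py; infer_instance

-- ===== CLAIM (what is proved, stated in full; the proofs are below) =====
def Claim_equal_split_on_punct_py : Prop := ∀ (words_list : List (List (String × String))), Dom_split_on_punct_py words_list → Pre_split_on_punct_py words_list → Spec_split_on_punct_py words_list (split_on_punct_py words_list)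

-- ===== LEMMAS AND PROOFS =====

-- A's loop without the accumulator: remaining groups given the current group `cur`
def aRun : List pvW → List pvW → List (List pvW)
  | cur, [] => if cur.isEmpty then [] else [cur]
  | cur, w :: ws => if pvPunct w then (cur ++ [w]) :: aRun [] ws else aRun (cur ++ [w]) ws

lemma aRun_nil (cur : List pvW) : aRun cur [] = if cur.isEmpty then [] else [cur] := rfl
lemma aRun_cons (cur : List pvW) (w : pvW) (ws : List pvW) :
    aRun cur (w :: ws) = if pvPunct w then (cur ++ [w]) :: aRun [] ws else aRun (cur ++ [w]) ws := rfl

lemma pvAStep_true (subs : List (List pvW)) (cur : List pvW) (w : pvW) (h : pvPunct w = true) :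
    pvAStep (subs, cur) w = (subs ++ [cur ++ [w]], []) := by simp [pvAStep, h]
lemma pvAStep_false (subs : List (List pvW)) (cur : List pvW) (w : pvW) (h : pvPunct w = false) :
    pvAStep (subs, cur) w = (subs, cur ++ [w]) := by simp [pvAStep, h]

lemma aFold (ws : List pvW) : ∀ (subs : List (List pvW)) (cur : List pvW),
    (if (ws.foldl pvAStep (subs, cur)).2.isEmpty then (ws.foldl pvAStep (subs, cur)).1
     else (ws.foldl pvAStep (subs, cur)).1 ++ [(ws.foldl pvAStep (subs, cur)).2])
      = subs ++ aRun cur ws := by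
  induction ws with
  | nil =>
    intro subs cur
    rw [List.foldl_nil, aRun_nil]
    cases cur.isEmpty <;> simp
  | cons w ws ih =>
    intro subs cur
    rw [List.foldl_cons, aRun_cons]
    cases h : pvPunct w
    · rw [pvAStep_false subs cur w h, ih]
      simp
    · rw [pvAStep_true subs cur w h, ih]
      simp

-- the cut indices, in Nat form
def pvCN : List pvW → List Nat
  | [] => []
  | w :: ws => (if pvPunct w then [0] else []) ++ (pvCN ws).map (· + 1)

-- B's slicing loop, in Nat/drop-take form
def pvF (ws : List pvW) (cs : List Nat) (acc : List (List pvW)) (s : Nat) : List (List pvW) × Nat :=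
  cs.foldl (fun st i => (st.1 ++ [(ws.drop st.2).take (i + 1 - st.2)], i + 1)) (acc, s)

@[simp] lemma pvF_nil (ws : List pvW) (acc : List (List pvW)) (s : Nat) : pvF ws [] acc s = (acc, s) := rfl
lemma pvF_cons (ws : List pvW) (i : Nat) (cs : List Nat) (acc : List (List pvW)) (s : Nat) :
    pvF ws (i :: cs) acc s = pvF ws cs (acc ++ [(ws.drop s).take (i + 1 - s)]) (i + 1) := rfl

def pvB (ws : List pvW) : List (List pvW) :=
  let st := pvF ws (pvCN ws) [] 0
  if st.2 < ws.length then st.1 ++ [ws.drop st.2] else st.1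

def pvGlue (p : List pvW) : List (List pvW) → List (List pvW)
  | [] => if p.isEmpty then [] else [p]
  | g :: gs => (p ++ g) :: gs

@[simp] lemma pvGlue_nilp (gs : List (List pvW)) : pvGlue [] gs = gs := by
  cases gs <;> simp [pvGlue]

lemma pvGlue_glue (a b : List pvW) (gs : List (List pvW)) (hb : b ≠ []) :
    pvGlue a (pvGlue b gs) = pvGlue (a ++ b) gs := by
  cases gs with
  | nil =>
    have hb' : b.isEmpty = false := by simpa using hb
    have hab : (a ++ b).isEmpty = false := by simp [hb]
    simp [pvGlue, hb', hab]
  | cons g gs => simp [pvGlue]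

lemma enumShift (xs : List pvW) : ∀ s : Int,
    PySem.List.enumerate xs (s + 1) = (PySem.List.enumerate xs s).map (fun p => (p.1 + 1, p.2)) := by
  induction xs with
  | nil => intro s; simp [PySem.List.enumerate_nil]
  | cons x xs ih =>
    intro s
    rw [PySem.List.enumerate_cons, PySem.List.enumerate_cons]
    have := ih (s + 1)
    rw [show s + 1 + 1 = (s + 1) + 1 by ring] at this
    simp [this]

lemma cutsEq (ws : List pvW) :
    ((PySem.List.enumerate ws 0).filter (fun p => pvPunct p.2)).map Prod.fst
      = (pvCN ws).map (Nat.cast : Nat → Int) := by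
  induction ws with
  | nil => simp [PySem.List.enumerate_nil, pvCN]
  | cons w ws ih =>
    rw [PySem.List.enumerate_cons, enumShift]
    have key : ((List.map (fun p : Int × pvW => (p.1 + 1, p.2)) (PySem.List.enumerate ws 0)).filter
        (fun p => pvPunct p.2)).map Prod.fst
        = ((pvCN ws).map (· + 1)).map (Nat.cast : Nat → Int) := by
      rw [List.filter_map, List.map_map, List.map_map]
      have : ((PySem.List.enumerate ws 0).filter
          ((fun p : Int × pvW => pvPunct p.2) ∘ (fun p : Int × pvW => (p.1 + 1, p.2))))
          = (PySem.List.enumerate ws 0).filter (fun p => pvPunct p.2) := by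
        simp [Function.comp_def]
      rw [this]
      have lhs : (Prod.fst ∘ fun p : Int × pvW => (p.1 + 1, p.2)) = (fun i => i + 1) ∘ Prod.fst := by
        funext p; rfl
      rw [lhs, ← List.map_map, ih]
      simp only [List.map_map]
      exact List.map_congr_left (fun n _ => by simp)
    cases h : pvPunct w <;>
      simp only [pvCN, h, if_true, if_false, List.filter_cons, List.map_cons,
        List.nil_append, List.singleton_append, Bool.false_eq_true, key, Nat.cast_zero]

lemma fIntNat (ws : List pvW) (cs : List Nat) : ∀ (acc : List (List pvW)) (s : Nat),
    (cs.map (Nat.cast : Nat → Int)).foldl (pvBStep ws) (acc, (s : Int))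
    = ((pvF ws cs acc s).1, ((pvF ws cs acc s).2 : Int)) := by
  induction cs with
  | nil => intro acc s; simp
  | cons n cs ih =>
    intro acc s
    have h1 : ((n : Int) + 1) = ((n + 1 : Nat) : Int) := by push_cast; ring
    simp only [List.map_cons, List.foldl_cons, pvF_cons, pvBStep, h1, PySem.List.slice_natCast]
    exact ih _ (n + 1)

lemma pvF_acc (ws : List pvW) (cs : List Nat) : ∀ (acc : List (List pvW)) (s : Nat),
    pvF ws cs acc s = (acc ++ (pvF ws cs [] s).1, (pvF ws cs [] s).2) := by
  induction cs with
  | nil => intro acc s; simp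
  | cons i cs ih =>
    intro acc s
    rw [pvF_cons, pvF_cons]
    simp only [List.nil_append]
    rw [ih, ih [(ws.drop s).take (i + 1 - s)]]
    simp

lemma pvF_shift (w : pvW) (ws : List pvW) (cs : List Nat) : ∀ (acc : List (List pvW)) (s : Nat),
    pvF (w :: ws) (cs.map (· + 1)) acc (s + 1)
      = ((pvF ws cs acc s).1, (pvF ws cs acc s).2 + 1) := by
  induction cs with
  | nil => intro acc s; simp
  | cons i cs ih =>
    intro acc s
    rw [List.map_cons, pvF_cons, pvF_cons]
    have h1 : (w :: ws).drop (s + 1) = ws.drop s := rfl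
    have h2 : i + 1 + 1 - (s + 1) = i + 1 - s := by omega
    rw [h1, h2]
    exact ih _ (i + 1)

lemma pvB_cons_true (w : pvW) (ws : List pvW) (h : pvPunct w = true) :
    pvB (w :: ws) = [w] :: pvB ws := by
  have hCN : pvCN (w :: ws) = 0 :: (pvCN ws).map (· + 1) := by simp [pvCN, h]
  have hsh := pvF_shift w ws (pvCN ws) [[w]] 0
  have hstep : pvF (w :: ws) (pvCN (w :: ws)) [] 0
      = ((pvF ws (pvCN ws) [[w]] 0).1, (pvF ws (pvCN ws) [[w]] 0).2 + 1) := by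
    rw [hCN, pvF_cons]
    simp only [List.nil_append, Nat.sub_zero, List.drop_zero, List.take_succ_cons, List.take_zero,
      Nat.zero_add] at hsh ⊢
    exact hsh
  unfold pvB
  rw [hstep, pvF_acc ws (pvCN ws) [[w]] 0]
  simp only [List.length_cons]
  by_cases hl : (pvF ws (pvCN ws) [] 0).2 < ws.length <;>
    simp [hl, List.drop_succ_cons]

lemma pvB_cons_false (w : pvW) (ws : List pvW) (h : pvPunct w = false) :
    pvB (w :: ws) = pvGlue [w] (pvB ws) := by
  have hCN : pvCN (w :: ws) = (pvCN ws).map (· + 1) := by simp [pvCN, h]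
  cases hc : pvCN ws with
  | nil =>
    cases ws with
    | nil => simp [pvB, pvCN, h, pvGlue]
    | cons x t => simp [pvB, hCN, hc, pvGlue]
  | cons i cs =>
    have hsh := pvF_shift w ws cs [w :: ws.take (i + 1)] (i + 1)
    unfold pvB
    rw [hCN, hc, List.map_cons, pvF_cons, pvF_cons]
    simp only [List.nil_append, Nat.sub_zero, List.drop_zero, List.take_succ_cons] at hsh ⊢
    rw [hsh, pvF_acc ws cs [w :: ws.take (i + 1)] (i + 1), pvF_acc ws cs [ws.take (i + 1)] (i + 1)]
    simp only [List.length_cons]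
    by_cases hl : (pvF ws cs [] (i + 1)).2 < ws.length <;>
      simp [hl, pvGlue]

lemma pvB_eq_aRun (ws : List pvW) : ∀ cur, pvGlue cur (pvB ws) = aRun cur ws := by
  induction ws with
  | nil => intro cur; simp [pvB, pvCN, aRun_nil, pvGlue]
  | cons w ws ih =>
    intro cur
    cases h : pvPunct w
    · rw [pvB_cons_false w ws h, pvGlue_glue cur [w] _ (by simp), ih]
      simp [aRun_cons, h]
    · rw [pvB_cons_true w ws h]
      have h1 : pvGlue cur ([w] :: pvB ws) = (cur ++ [w]) :: pvB ws := rfl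
      rw [h1, show pvB ws = pvGlue [] (pvB ws) from (pvGlue_nilp _).symm, ih]
      simp [aRun_cons, h]

lemma altEq (ws : List pvW) : split_on_punct_py_alt ws = pvB ws := by
  simp only [split_on_punct_py_alt]
  rw [cutsEq, show (0 : Int) = ((0 : Nat) : Int) from rfl, fIntNat]
  unfold pvB
  by_cases hl : (pvF ws (pvCN ws) [] 0).2 < ws.length
  · have hl' : ((pvF ws (pvCN ws) [] 0).2 : Int) < (ws.length : Int) := by exact_mod_cast hl
    simp [hl', hl, PySem.List.slice_from_natCast]
  · have hl' : ¬ ((pvF ws (pvCN ws) [] 0).2 : Int) < (ws.length : Int) := by exact_mod_cast hl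
    simp [hl', hl]

-- ===== VERDICT (by name: the statement is the Claim_ definition above) =====
theorem split_on_punct_py_spec : Claim_equal_split_on_punct_py := by
  intro ws _ _
  unfold Spec_split_on_punct_py
  rw [altEq]
  have hA : split_on_punct_py ws = aRun [] ws := by
    simp only [split_on_punct_py]
    simpa using aFold ws [] []
  rw [hA, ← pvB_eq_aRun ws [], pvGlue_nilp]
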